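-- pv_equiv track=rewrite | github.com/nlesc-nano/auto-FOX | FOX/functions/charge_parser.py | _split_operator
-- ===== SOURCE A (Python) =====
-- from typing import Optional, Dict, Union, Iterable, Tuple, Generator, List, cast
--
-- def _split_operator(constrain: str) -> List[str]:
--     plus_split = constrain.split("+")
--     if '-' not in constrain:
--         return plus_split
--
--     ret = []
--     for item in plus_split:
--         if '-' not in item:
--             ret.append(item)
--             continue
--
--         item_split = item.split("-")
--         if item_split[0]:
--             ret.append(item_split[0])
--         ret += [f'-{i}' for i in item_split[1:]]
--     return ret
-- ===== SOURCE B (Python) =====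
-- from typing import List
--
-- def _split_operator(constrain: str) -> List[str]:
--     # single pass: buffer `cur`, sign flag `neg`; '+' flushes unconditionally,
--     # '-' flushes (positive buffer only if nonempty) and starts a negative token
--     ret = []
--     cur = ''
--     neg = False
--     for ch in constrain:
--         if ch == '+':
--             ret.append('-' + cur if neg else cur)
--             cur = ''
--             neg = False
--         elif ch == '-':
--             if neg or cur:
--                 ret.append('-' + cur if neg else cur)
--             cur = ''
--             neg = True
--         else:
--             cur += ch
--     ret.append('-' + cur if neg else cur)
--     return ret
-- ===== Notes on version B (the rewrite author's own statement) =====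
-- stated objective: alternative
-- what changed: Replaced the split-on-'+'-then-split-on-'-' two-level list processing by a single left-to-right character scanner with a token buffer and a sign flag.
import Mathlib
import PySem

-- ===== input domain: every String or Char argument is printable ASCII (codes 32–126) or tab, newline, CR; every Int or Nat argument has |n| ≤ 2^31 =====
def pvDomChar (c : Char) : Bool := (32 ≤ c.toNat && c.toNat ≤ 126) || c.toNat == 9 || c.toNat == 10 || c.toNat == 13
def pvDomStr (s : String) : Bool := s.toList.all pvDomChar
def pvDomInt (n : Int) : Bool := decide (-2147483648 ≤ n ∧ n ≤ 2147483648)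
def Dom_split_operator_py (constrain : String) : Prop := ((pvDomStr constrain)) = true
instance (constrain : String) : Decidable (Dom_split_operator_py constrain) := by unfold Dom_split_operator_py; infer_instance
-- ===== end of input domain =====

-- B replaces A's split-on-'+'-then-split-on-'-' passes by a single character scan; alternative decomposition, same cost.

-- ===== PORT A =====
-- literal transliteration of _split_operator: split on '+', early return if no '-',
-- else re-split each item on '-' (first part kept only if nonempty, rest prefixed with '-')
def split_operator_py (constrain : String) : List String :=
  let plus_split := (PySem.Chars.splitOn constrain.toList ['+']).map String.ofList
  if PySem.Str.isIn "-" constrain = false then plus_split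
  else
    plus_split.foldl (fun ret item =>
      if PySem.Str.isIn "-" item = false then ret ++ [item]
      else
        let item_split := (PySem.Chars.splitOn item.toList ['-']).map String.ofList
        let ret := if item_split.head! ≠ "" then ret ++ [item_split.head!] else ret
        ret ++ (item_split.tail.map (fun i => "-" ++ i))) []

-- ===== PORT B =====
-- Source B's pending token: '-' + cur if neg else cur
def pvTok (cur : List Char) (neg : Bool) : String :=
  String.ofList (if neg then '-' :: cur else cur)

-- single pass over the characters, state (ret, cur, neg), final flush (Source B line for line)
def split_operator_py_alt (constrain : String) : List String :=
  let st := constrain.toList.foldl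
    (fun (st : List String × List Char × Bool) ch =>
      let ret := st.1
      let cur := st.2.1
      let neg := st.2.2
      if ch = '+' then (ret ++ [pvTok cur neg], [], false)
      else if ch = '-' then
        ((if neg ∨ cur ≠ [] then ret ++ [pvTok cur neg] else ret), [], true)
      else (ret, cur ++ [ch], neg))
    ([], [], false)
  st.1 ++ [pvTok st.2.1 st.2.2]

-- ===== PRECONDITION & SPEC =====
def Spec_split_operator_py (constrain : String) (out : List String) : Prop := out = split_operator_py_alt constrain
instance (constrain : String) (out : List String) : Decidable (Spec_split_operator_py constrain out) := by unfold Spec_split_operator_py; infer_instance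

-- ===== CLAIM (what is proved, stated in full; the proofs are below) =====
def Claim_equal_split_operator_py : Prop := ∀ (constrain : String), Dom_split_operator_py constrain → Spec_split_operator_py constrain (split_operator_py constrain)

-- ===== LEMMAS AND PROOFS =====

-- simple structural version of str.split on a single-character separator
def splitC (c : Char) : List Char → List (List Char)
  | [] => [[]]
  | a :: rest =>
      if a = c then [] :: splitC c rest
      else
        match splitC c rest with
        | [] => [[a]]
        | t :: ts => (a :: t) :: ts

-- prepend a chunk onto the first piece
def consHead (pre : List Char) : List (List Char) → List (List Char)
  | [] => [pre]
  | t :: ts => (pre ++ t) :: ts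

theorem splitC_ne_nil (c : Char) (cs : List Char) : splitC c cs ≠ [] := by
  induction cs with
  | nil => simp [splitC]
  | cons a rest ih =>
    simp only [splitC]
    split
    · simp
    · cases h : splitC c rest <;> simp

theorem splitOn_go_eq (c : Char) :
    ∀ (fuel : Nat) (cs cur : List Char) (acc : List (List Char)), cs.length < fuel →
      PySem.Chars.splitOn.go [c] fuel cs cur acc =
        acc.reverse ++ consHead cur.reverse (splitC c cs) := by
  intro fuel
  induction fuel with
  | zero => intro cs cur acc h; omega
  | succ f ih =>
    intro cs cur acc h
    cases cs with
    | nil => simp [PySem.Chars.splitOn.go, splitC, consHead]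
    | cons a rest =>
      simp only [PySem.Chars.splitOn.go]
      by_cases hac : a = c
      · subst hac
        have : List.isPrefixOf [a] (a :: rest) = true := by simp [List.isPrefixOf]
        rw [if_pos this, ih]
        · simp [splitC, consHead]
          cases h' : splitC a rest with
          | nil => exact absurd h' (splitC_ne_nil a rest)
          | cons t ts => simp [consHead]
        · simpa using Nat.lt_of_succ_lt_succ h
      · have : List.isPrefixOf [c] (a :: rest) = false := by
          simp [List.isPrefixOf]
          exact fun hca => absurd hca.symm hac
        rw [if_neg (by simp [this]), ih]
        · cases h' : splitC c rest with
          | nil => exact absurd h' (splitC_ne_nil c rest)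
          | cons t ts => simp [splitC, hac, h', consHead]
        · simpa using Nat.lt_of_succ_lt_succ h
      
theorem splitOn_eq_splitC (c : Char) (cs : List Char) :
    PySem.Chars.splitOn cs [c] = splitC c cs := by
  rw [PySem.Chars.splitOn, splitOn_go_eq c (cs.length + 1) cs [] [] (by omega)]
  cases h : splitC c cs with
  | nil => exact absurd h (splitC_ne_nil c cs)
  | cons t ts => simp [consHead]

theorem splitC_append (c : Char) (xs ys : List Char) (h : c ∉ xs) :
    splitC c (xs ++ ys) = consHead xs (splitC c ys) := by
  induction xs with
  | nil =>
    simp only [List.nil_append]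
    cases h' : splitC c ys with
    | nil => exact absurd h' (splitC_ne_nil c ys)
    | cons t ts => simp [consHead]
  | cons a xs ih =>
    have hac : a ≠ c := fun hh => h (by simp [hh])
    have hx : c ∉ xs := fun hh => h (by simp [hh])
    simp only [List.cons_append, splitC, if_neg hac, ih hx]
    cases h' : splitC c ys with
    | nil => exact absurd h' (splitC_ne_nil c ys)
    | cons t ts => simp [consHead]

theorem splitC_of_not_mem (c : Char) (cs : List Char) (h : c ∉ cs) :
    splitC c cs = [cs] := by
  have := splitC_append c cs [] h
  simpa [splitC, consHead] using this

theorem splitC_sep (c : Char) (xs ys : List Char) (h : c ∉ xs) :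
    splitC c (xs ++ c :: ys) = xs :: splitC c ys := by
  rw [splitC_append c xs (c :: ys) h]
  simp [splitC, consHead]

theorem mem_of_mem_splitC (c : Char) (cs seg : List Char) (x : Char)
    (hseg : seg ∈ splitC c cs) (hx : x ∈ seg) : x ∈ cs := by
  induction cs generalizing seg with
  | nil =>
    simp [splitC] at hseg
    subst hseg; simp at hx
  | cons a rest ih =>
    simp only [splitC] at hseg
    by_cases hac : a = c
    · rw [if_pos hac] at hseg
      rcases List.mem_cons.mp hseg with h | h
      · subst h; simp at hx
      · exact List.mem_cons_of_mem a (ih seg h hx)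
    · rw [if_neg hac] at hseg
      cases h' : splitC c rest with
      | nil => exact absurd h' (splitC_ne_nil c rest)
      | cons t ts =>
        rw [h'] at hseg
        rcases List.mem_cons.mp hseg with h | h
        · subst h
          rcases List.mem_cons.mp hx with h | h
          · simp [h]
          · exact List.mem_cons_of_mem a (ih t (by simp [h']) h)
        · exact List.mem_cons_of_mem a (ih seg (by simp [h', h]) hx)

theorem splitC_tail_ne_nil (c : Char) (cs : List Char) (h : c ∈ cs) :
    (splitC c cs).tail ≠ [] := by
  induction cs with
  | nil => simp at h
  | cons a rest ih =>
    simp only [splitC]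
    by_cases hac : a = c
    · rw [if_pos hac]
      simpa using splitC_ne_nil c rest
    · have hr : c ∈ rest := by
        rcases List.mem_cons.mp h with h' | h'
        · exact absurd h'.symm hac
        · exact h'
      rw [if_neg hac]
      cases h' : splitC c rest with
      | nil => exact absurd h' (splitC_ne_nil c rest)
      | cons t ts =>
        have := ih hr
        rw [h'] at this
        simpa using this

-- what the scanner emits for one '+'-delimited segment ws (scanned with positive sign)
def emitP (ws : List Char) : List String :=
  match splitC '-' ws with
  | [] => []
  | t :: ts =>
      (if ts = [] ∨ t ≠ [] then [String.ofList t] else []) ++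
        ts.map (fun u => String.ofList ('-' :: u))

-- structural recursion mirroring B's scanner (state threaded as arguments)
def specScan (cur : List Char) (neg : Bool) : List Char → List String
  | [] => [pvTok cur neg]
  | a :: rest =>
      if a = '+' then pvTok cur neg :: specScan [] false rest
      else if a = '-' then
        (if neg ∨ cur ≠ [] then [pvTok cur neg] else []) ++ specScan [] true rest
      else specScan (cur ++ [a]) neg rest

theorem scan_eq_specScan (cs : List Char) :
    ∀ (ret : List String) (cur : List Char) (neg : Bool),
      (let st := cs.foldl
        (fun (st : List String × List Char × Bool) ch =>
          let ret := st.1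
          let cur := st.2.1
          let neg := st.2.2
          if ch = '+' then (ret ++ [pvTok cur neg], [], false)
          else if ch = '-' then
            ((if neg ∨ cur ≠ [] then ret ++ [pvTok cur neg] else ret), [], true)
          else (ret, cur ++ [ch], neg))
        (ret, cur, neg)
       st.1 ++ [pvTok st.2.1 st.2.2]) = ret ++ specScan cur neg cs := by
  induction cs with
  | nil => intro ret cur neg; simp [specScan]
  | cons a rest ih =>
    intro ret cur neg
    simp only [List.foldl_cons, specScan]
    by_cases h1 : a = '+'
    · simp only [if_pos h1, ih]; simp
    · by_cases h2 : a = '-'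
      · simp only [if_neg h1, if_pos h2, ih]
        split <;> simp
      · simp only [if_neg h1, if_neg h2, ih]

theorem specScan_chars (cs : List Char) :
    ∀ cur : List Char, '-' ∉ cur → '+' ∉ cur →
      (specScan cur false cs = (splitC '+' (cur ++ cs)).flatMap emitP ∧
       specScan cur true cs =
         (splitC '-' (cur ++ (splitC '+' cs).head!)).map (fun u => String.ofList ('-' :: u)) ++
           ((splitC '+' cs).tail).flatMap emitP) := by
  induction cs with
  | nil =>
    intro cur hm hp
    constructor
    · rw [specScan, List.append_nil, splitC_of_not_mem '+' cur hp]
      simp [emitP, splitC_of_not_mem '-' cur hm, pvTok]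
    · rw [specScan]
      simp [splitC, splitC_of_not_mem '-' cur hm, pvTok]
  | cons a rest ih =>
    intro cur hm hp
    constructor
    · -- neg = false
      simp only [specScan]
      by_cases h1 : a = '+'
      · subst h1
        rw [if_pos rfl, (ih [] (by simp) (by simp)).1, splitC_sep '+' cur rest hp]
        simp [emitP, splitC_of_not_mem '-' cur hm, pvTok]
      · by_cases h2 : a = '-'
        · subst h2
          rw [if_neg h1, if_pos rfl, (ih [] (by simp) (by simp)).2]
          have hsp : splitC '+' (cur ++ '-' :: rest) =
              consHead cur (splitC '+' ('-' :: rest)) := splitC_append '+' cur _ hp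
          have h3 : splitC '+' ('-' :: rest) =
              ('-' :: (splitC '+' rest).head!) :: (splitC '+' rest).tail := by
            simp only [splitC]
            rw [if_neg (by decide)]
            cases h' : splitC '+' rest with
            | nil => exact absurd h' (splitC_ne_nil _ _)
            | cons t ts => simp
          rw [hsp, h3]
          simp only [consHead, List.flatMap_cons]
          have h4 : emitP (cur ++ '-' :: (splitC '+' rest).head!) =
              (if cur ≠ [] then [String.ofList cur] else []) ++
                (splitC '-' ([] ++ (splitC '+' rest).head!)).map (fun u => String.ofList ('-' :: u)) := by
            simp only [emitP, List.nil_append]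
            rw [splitC_sep '-' cur _ hm]
            have ht : splitC '-' (splitC '+' rest).head! ≠ [] := splitC_ne_nil _ _
            cases h' : splitC '-' (splitC '+' rest).head! with
            | nil => exact absurd h' ht
            | cons t ts => simp
          rw [h4]
          simp [pvTok]
        · rw [if_neg h1, if_neg h2,
            (ih (cur ++ [a]) (by simp [hm, Ne.symm h2]) (by simp [hp, Ne.symm h1])).1]
          simp
    · -- neg = true
      simp only [specScan]
      by_cases h1 : a = '+'
      · subst h1
        rw [if_pos rfl, (ih [] (by simp) (by simp)).1]
        have h3 : splitC '+' ('+' :: rest) = [] :: splitC '+' rest := by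
          simp [splitC]
        rw [h3]
        simp [splitC_of_not_mem '-' cur hm, pvTok]
      · by_cases h2 : a = '-'
        · subst h2
          rw [if_neg h1, if_pos rfl, (ih [] (by simp) (by simp)).2]
          have h3 : splitC '+' ('-' :: rest) =
              ('-' :: (splitC '+' rest).head!) :: (splitC '+' rest).tail := by
            simp only [splitC]
            rw [if_neg (by decide)]
            cases h' : splitC '+' rest with
            | nil => exact absurd h' (splitC_ne_nil _ _)
            | cons t ts => simp
          rw [h3]
          simp only [List.head!_cons, List.tail_cons]
          rw [splitC_sep '-' cur _ hm]
          simp [pvTok]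
        · rw [if_neg h1, if_neg h2,
            (ih (cur ++ [a]) (by simp [hm, Ne.symm h2]) (by simp [hp, Ne.symm h1])).2]
          have h3 : splitC '+' (a :: rest) =
              (a :: (splitC '+' rest).head!) :: (splitC '+' rest).tail := by
            simp only [splitC]
            rw [if_neg h1]
            cases h' : splitC '+' rest with
            | nil => exact absurd h' (splitC_ne_nil _ _)
            | cons t ts => simp
          rw [h3]
          simp

theorem alt_eq_flatMap (s : String) :
    split_operator_py_alt s = (splitC '+' s.toList).flatMap emitP := by
  unfold split_operator_py_alt
  rw [scan_eq_specScan s.toList [] [] false]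
  simpa using (specScan_chars s.toList [] (by simp) (by simp)).1

theorem isIn_dashC (l : List Char) : PySem.Chars.isIn ['-'] l = true ↔ '-' ∈ l := by
  rw [PySem.Chars.isIn_iff_infix]
  exact List.singleton_infix_iff '-' l

theorem isIn_dashC_eq (l : List Char) : PySem.Chars.isIn ['-'] l = decide ('-' ∈ l) := by
  by_cases h : '-' ∈ l
  · simp [h, (isIn_dashC l).mpr h]
  · simp only [h, decide_false]
    rw [← Bool.not_eq_true]
    simp [isIn_dashC, h]

theorem ofList_eq_empty_iff (l : List Char) : String.ofList l = "" ↔ l = [] := by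
  constructor
  · intro h
    have := congrArg String.toList h
    simpa using this
  · intro h; simp [h]

theorem dash_append (u : List Char) : "-" ++ String.ofList u = String.ofList ('-' :: u) := by
  have : ("-" ++ String.ofList u).toList = (String.ofList ('-' :: u)).toList := by
    simp
  exact String.toList_inj.mp (by simpa using this)

theorem a_eq_flatMap (s : String) :
    split_operator_py s = (splitC '+' s.toList).flatMap emitP := by
  unfold split_operator_py
  simp only [splitOn_eq_splitC]
  by_cases hd : '-' ∈ s.toList
  · rw [if_neg (by simp [isIn_dashC_eq, hd])]
    have hbody : (fun (ret : List String) (item : String) =>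
        if PySem.Str.isIn "-" item = false then ret ++ [item]
        else
          (if (List.map String.ofList (splitC '-' item.toList)).head! ≠ "" then
              ret ++ [(List.map String.ofList (splitC '-' item.toList)).head!]
            else ret) ++
            List.map (fun i => "-" ++ i) (List.map String.ofList (splitC '-' item.toList)).tail) =
        (fun ret item => ret ++
          (if PySem.Str.isIn "-" item = false then [item]
           else
             (if (List.map String.ofList (splitC '-' item.toList)).head! ≠ "" then
                [(List.map String.ofList (splitC '-' item.toList)).head!] else []) ++
               List.map (fun i => "-" ++ i) (List.map String.ofList (splitC '-' item.toList)).tail)) := by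
      funext ret item
      split
      · rfl
      · split <;> simp
    rw [hbody, PySem.List.foldl_append_eq_flatMap, List.nil_append, List.flatMap_map]
    apply List.flatMap_congr
    intro seg hseg
    by_cases hds : '-' ∈ seg
    · rw [if_neg (by simp [isIn_dashC_eq, hds])]
      have htl := splitC_tail_ne_nil '-' seg hds
      cases h' : splitC '-' seg with
      | nil => exact absurd h' (splitC_ne_nil _ _)
      | cons t ts =>
        rw [h'] at htl
        simp only [List.tail_cons] at htl
        have hmap : List.map (fun i => "-" ++ i) (List.map String.ofList ts) =
            List.map (fun u => String.ofList ('-' :: u)) ts := by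
          rw [List.map_map]
          exact List.map_congr_left fun u _ => dash_append u
        simp only [String.toList_ofList, h', List.map_cons, List.head!_cons, List.tail_cons,
          emitP, hmap]
        by_cases ht : t = []
        · simp [ht, htl, ofList_eq_empty_iff]
        · simp [ht, htl, ofList_eq_empty_iff]
    · rw [if_pos (by simp [isIn_dashC_eq, hds])]
      simp [emitP, splitC_of_not_mem '-' seg hds]
  · rw [if_pos (by simp [isIn_dashC_eq, hd])]
    rw [List.map_eq_flatMap]
    apply List.flatMap_congr
    intro seg hseg
    have : '-' ∉ seg := fun h => hd (mem_of_mem_splitC '+' s.toList seg '-' hseg h)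
    simp [emitP, splitC_of_not_mem '-' seg this]

-- ===== VERDICT (by name: the statement is the Claim_ definition above) =====
theorem split_operator_py_spec : Claim_equal_split_operator_py := by
  intro s _
  unfold Spec_split_operator_py
  rw [a_eq_flatMap, alt_eq_flatMap]
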